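-- pv_equiv track=rewrite | github.com/MikhailoVL/testbeetroot | recursia/list_sum.py | rec_str
-- ===== SOURCE A (Python) =====
-- def rec_str(eng_str):
--     if len(eng_str) % 2 == 0:
--         if len(eng_str) == 2:
--             return "(" + eng_str + ")"
--         else:
--             return "(" + eng_str[0] + rec_str(eng_str[1:-1]) + eng_str[-1] + ")"
--     else:
--         if len(eng_str) == 1:
--             return "(" + eng_str + ")"
--         else:
--             if len(eng_str) > 0:
--                 return "(" + eng_str[0] + rec_str(eng_str[1:-1]) + eng_str[-1] + ")"
-- ===== SOURCE B (Python) =====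
-- # Iterative two-pointer rewrite: builds the nested wrapping in one pass with
-- # prefix/suffix lists instead of both-ends recursion. Returns "()" on empty
-- # input where A raises IndexError (excluded by Pre_).
-- def rec_str(eng_str):
--     lo = 0
--     hi = len(eng_str) - 1
--     prefix = []
--     suffix = []
--     while hi - lo + 1 > 2:
--         prefix.append("(" + eng_str[lo])
--         suffix.append(eng_str[hi] + ")")
--         lo += 1
--         hi -= 1
--     middle = "(" + eng_str[lo:hi + 1] + ")"
--     return "".join(prefix) + middle + "".join(reversed(suffix))
-- ===== Notes on version B (the rewrite author's own statement) =====
-- stated objective: faster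
-- what changed: Replaced the both-ends recursion (which re-slices and re-concatenates the string at every level) by a single iterative two-pointer pass that accumulates prefix/suffix pieces in lists and joins them once at the end.
-- crash fix: On the empty string A raises IndexError (eng_str[0] in the even-length recursive branch) while B returns the wrapping of the empty slice, an opening and a closing parenthesis. — e.g. on rec_str(""): A raises IndexError, B returns "()"
import Mathlib
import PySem

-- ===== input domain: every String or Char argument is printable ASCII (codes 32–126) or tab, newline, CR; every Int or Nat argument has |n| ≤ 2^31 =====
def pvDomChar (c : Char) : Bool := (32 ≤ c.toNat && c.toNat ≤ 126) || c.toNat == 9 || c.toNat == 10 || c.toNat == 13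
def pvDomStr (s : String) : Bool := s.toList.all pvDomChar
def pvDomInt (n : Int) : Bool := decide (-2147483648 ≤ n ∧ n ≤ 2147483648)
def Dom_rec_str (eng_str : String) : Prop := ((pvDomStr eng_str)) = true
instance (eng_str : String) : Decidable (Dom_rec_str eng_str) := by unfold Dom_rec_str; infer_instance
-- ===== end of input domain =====

-- B replaces A's both-ends recursion (which re-slices the string at every level) by one
-- iterative two-pointer pass joining accumulated prefix/suffix pieces once (objective: faster).

-- ===== PORT A =====
-- A's recursion, over the character list of the string (strings are built at the end).
def pvRecA (l : List Char) : List Char :=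
  if l.length % 2 == 0 then
    if l.length == 2 then ['('] ++ l ++ [')']
    else
      match l with
      | [] => []  -- Python raises IndexError here (eng_str[0] on the empty string); outside Pre_
      | c :: rest => ['('] ++ [c] ++ pvRecA rest.dropLast ++ [(c :: rest).getLastD ' '] ++ [')']
  else
    if l.length == 1 then ['('] ++ l ++ [')']
    else
      match l with
      | [] => []  -- unreachable: odd length
      | c :: rest => ['('] ++ [c] ++ pvRecA rest.dropLast ++ [(c :: rest).getLastD ' '] ++ [')']
termination_by l.length
decreasing_by all_goals (simp [List.length_dropLast]; try omega)

def rec_str (eng_str : String) : String := String.ofList (pvRecA eng_str.toList)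

-- ===== PORT B =====
-- B's while-loop: lo/hi two pointers, prefix and suffix accumulator lists.
def pvLoopB (l : List Char) (lo hi : Int) (pre suf : List (List Char)) : List Char :=
  if hi - lo + 1 > 2 then
    pvLoopB l (lo + 1) (hi - 1)
      (pre ++ [['('] ++ [l.getD lo.toNat ' ']])
      (suf ++ [[l.getD hi.toNat ' '] ++ [')']])
  else
    pre.flatten ++ (['('] ++ (l.drop lo.toNat).take (hi + 1 - lo).toNat ++ [')']) ++ suf.reverse.flatten
termination_by (hi - lo + 1).toNat
decreasing_by omega

def rec_str_alt (eng_str : String) : String :=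
  String.ofList (pvLoopB eng_str.toList 0 ((eng_str.toList.length : Int) - 1) [] [])

-- ===== PRECONDITION & SPEC =====
-- Pre_ excludes only the empty string, on which A raises IndexError.
def Pre_rec_str (eng_str : String) : Prop := eng_str ≠ ""
instance (eng_str : String) : Decidable (Pre_rec_str eng_str) := by unfold Pre_rec_str; infer_instance
def pvWitness_rec_str : String := "abc"

-- On the empty string A raises IndexError (eng_str[0]) while B returns the wrapping
-- of the empty slice, an opening and a closing parenthesis.
def Raises_rec_str (eng_str : String) : Prop := eng_str = ""
instance (eng_str : String) : Decidable (Raises_rec_str eng_str) := by unfold Raises_rec_str; infer_instance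
def pvRaiseWitness_rec_str : String := ""
def pvRaiseWitnessOut_rec_str : String := "()"

def Spec_rec_str (eng_str : String) (out : String) : Prop := out = rec_str_alt eng_str
instance (eng_str : String) (out : String) : Decidable (Spec_rec_str eng_str out) := by unfold Spec_rec_str; infer_instance

-- ===== CLAIM (what is proved, stated in full; the proofs are below) =====
def Claim_equal_rec_str : Prop := ∀ (eng_str : String), Dom_rec_str eng_str → Pre_rec_str eng_str → Spec_rec_str eng_str (rec_str eng_str)
def Claim_raises_rec_str : Prop := (∀ (eng_str : String), Dom_rec_str eng_str → Raises_rec_str eng_str → ¬ Pre_rec_str eng_str) ∧ (Dom_rec_str (pvRaiseWitness_rec_str) ∧ Raises_rec_str (pvRaiseWitness_rec_str) ∧ rec_str_alt (pvRaiseWitness_rec_str) = pvRaiseWitnessOut_rec_str)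

-- ===== LEMMAS AND PROOFS =====

lemma pvRecA_short (m : List Char) (h : m.length = 1 ∨ m.length = 2) :
    pvRecA m = ['('] ++ m ++ [')'] := by
  rcases h with h | h
  · obtain ⟨a, rfl⟩ := List.length_eq_one_iff.mp h
    rw [pvRecA]; simp
  · obtain ⟨a, b, rfl⟩ := List.length_eq_two.mp h
    rw [pvRecA]; simp

lemma pvRecA_long (c : Char) (rest : List Char) (h : 2 ≤ rest.length) :
    pvRecA (c :: rest) =
      ['('] ++ [c] ++ pvRecA rest.dropLast ++ [(c :: rest).getLastD ' '] ++ [')'] := by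
  have h1 : rest.length ≠ 1 := by omega
  have h2 : rest ≠ [] := by intro h'; rw [h'] at h; simp at h
  rw [pvRecA.eq_def]
  split_ifs <;> simp_all

lemma loopB_eq : ∀ (n : Nat) (l : List Char) (lo hi : Int) (pre suf : List (List Char)),
    (hi - lo).toNat = n → 0 ≤ lo → lo ≤ hi → hi < l.length →
    pvLoopB l lo hi pre suf =
      pre.flatten ++ pvRecA ((l.drop lo.toNat).take (hi + 1 - lo).toNat) ++ suf.reverse.flatten := by
  intro n
  induction n using Nat.strong_induction_on with
  | _ n ih =>
    intro l lo hi pre suf hn h0 h1 h2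
    by_cases hgt : hi - lo + 1 > 2
    · -- loop step: the slice has length ≥ 3
      have hk3 : 3 ≤ (hi + 1 - lo).toNat := by omega
      have hal : lo.toNat + (hi + 1 - lo).toNat ≤ l.length := by omega
      rw [pvLoopB, if_pos hgt]
      rw [ih ((hi - 1) - (lo + 1)).toNat (by omega) l (lo + 1) (hi - 1) _ _ rfl
          (by omega) (by omega) (by omega)]
      have ha1 : (lo + 1).toNat = lo.toNat + 1 := by omega
      have hk2 : ((hi - 1) + 1 - (lo + 1)).toNat = (hi + 1 - lo).toNat - 2 := by omega
      have hhi : hi.toNat = lo.toNat + (hi + 1 - lo).toNat - 1 := by omega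
      have haL : lo.toNat < l.length := by omega
      have hd : l.drop lo.toNat = l[lo.toNat] :: l.drop (lo.toNat + 1) :=
        List.drop_eq_getElem_cons haL
      have hmid : ((l.drop lo.toNat).take (hi + 1 - lo).toNat).length = (hi + 1 - lo).toNat := by
        simp [List.length_take, List.length_drop]; omega
      have hmid_cons : (l.drop lo.toNat).take (hi + 1 - lo).toNat =
          l[lo.toNat] :: (l.drop (lo.toNat + 1)).take ((hi + 1 - lo).toNat - 1) := by
        rw [hd, List.take_cons (by omega)]
      have hrest_len : ((l.drop (lo.toNat + 1)).take ((hi + 1 - lo).toNat - 1)).length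
          = (hi + 1 - lo).toNat - 1 := by
        simp [List.length_take, List.length_drop]; omega
      have hdropLast : ((l.drop (lo.toNat + 1)).take ((hi + 1 - lo).toNat - 1)).dropLast
          = (l.drop (lo.toNat + 1)).take ((hi + 1 - lo).toNat - 2) := by
        rw [List.dropLast_eq_take, hrest_len, List.take_take]
        congr 1; omega
      have hgetA : l.getD lo.toNat ' ' = l[lo.toNat] := List.getD_eq_getElem l ' ' haL
      have hlast : ((l.drop lo.toNat).take (hi + 1 - lo).toNat).getLastD ' '
          = l.getD hi.toNat ' ' := by
        have hkm : (hi + 1 - lo).toNat - 1 < (hi + 1 - lo).toNat := by omega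
        rw [List.getLastD_eq_getLast?, List.getLast?_eq_getElem?, hmid,
          List.getElem?_take_of_lt hkm, List.getElem?_drop, List.getD_eq_getElem?_getD, hhi]
        congr 2
        omega
      have hrecA : pvRecA ((l.drop lo.toNat).take (hi + 1 - lo).toNat) =
          ['('] ++ [l.getD lo.toNat ' '] ++
            pvRecA ((l.drop (lo.toNat + 1)).take ((hi + 1 - lo).toNat - 2)) ++
            [l.getD hi.toNat ' '] ++ [')'] := by
        rw [hmid_cons, pvRecA_long _ _ (by omega), hdropLast, ← hmid_cons, hlast, hgetA]
      rw [ha1, hk2, hrecA]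
      simp [List.flatten_append]
    · -- base: the remaining slice has length 1 or 2
      have hmid : ((l.drop lo.toNat).take (hi + 1 - lo).toNat).length = (hi + 1 - lo).toNat := by
        simp [List.length_take, List.length_drop]; omega
      rw [pvLoopB, if_neg hgt]
      rw [pvRecA_short _ (by rw [hmid]; omega)]

-- ===== VERDICT (by name: the statement is the Claim_ definition above) =====
theorem rec_str_spec : Claim_equal_rec_str := by
  intro s _ hpre
  unfold Spec_rec_str rec_str rec_str_alt
  have hne : s.toList ≠ [] := fun h => hpre (String.toList_eq_nil_iff.mp h)
  have hlen : 1 ≤ s.toList.length := by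
    cases h : s.toList with
    | nil => exact absurd h hne
    | cons c t => simp
  rw [loopB_eq (((s.toList.length : Int) - 1) - 0).toNat s.toList 0 ((s.toList.length : Int) - 1)
      [] [] rfl (by omega) (by omega) (by omega)]
  have h1 : (((s.toList.length : Int) - 1) + 1 - 0).toNat = s.toList.length := by omega
  have h2 : ((0 : Int)).toNat = 0 := rfl
  rw [h1, h2, List.drop_zero, List.take_length]
  simp

theorem rec_str_raises : Claim_raises_rec_str := by
  unfold Claim_raises_rec_str
  refine ⟨fun s _ h hp => hp h, by decide, rfl, ?_⟩
  show String.ofList (pvLoopB "".toList 0 (("".toList.length : Int) - 1) [] []) = "()"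
  rw [pvLoopB]
  norm_num

-- self-check: B's port really returns the stated literal on the raise witness
theorem pvRaiseWitness_ok : rec_str_alt pvRaiseWitness_rec_str = pvRaiseWitnessOut_rec_str :=
  rec_str_raises.2.2.2
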